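-- pv_equiv track=rewrite | github.com/2226171237/Algorithmpractice | chapter05_string/t5.8.py | string2int2
-- ===== SOURCE A (Python) =====
-- def isNumber(c):
--     return  '0'<=c<='9'
--
-- def string2int2(s):
--     sign = -1 if s[0]=='-' else 1
--     result=0
--     i=0 if isNumber(s[0]) else 1
--     for x in s[i:]:
--         if isNumber(x):
--             result*=10
--             result+=ord(x)-ord('0')
--         else:
--             raise ValueError('not a number string')
--     return sign*result
-- ===== SOURCE B (Python) =====
-- def string2int2(s):
--     sign = -1 if s[0] == '-' else 1
--     body = s if '0' <= s[0] <= '9' else s[1:]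
--     if any(not ('0' <= c <= '9') for c in body):
--         raise ValueError('not a number string')
--     result = sum((ord(c) - ord('0')) * 10 ** p for p, c in enumerate(reversed(body)))
--     return sign * result
-- ===== Notes on version B (the rewrite author's own statement) =====
-- stated objective: alternative
-- what changed: A's single Horner accumulation loop (result = result*10 + digit, raising inside the loop) is replaced by a validate-first guard over the body plus a separate positional weighted-sum pass digit*10**p over the reversed body.
import Mathlib
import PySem

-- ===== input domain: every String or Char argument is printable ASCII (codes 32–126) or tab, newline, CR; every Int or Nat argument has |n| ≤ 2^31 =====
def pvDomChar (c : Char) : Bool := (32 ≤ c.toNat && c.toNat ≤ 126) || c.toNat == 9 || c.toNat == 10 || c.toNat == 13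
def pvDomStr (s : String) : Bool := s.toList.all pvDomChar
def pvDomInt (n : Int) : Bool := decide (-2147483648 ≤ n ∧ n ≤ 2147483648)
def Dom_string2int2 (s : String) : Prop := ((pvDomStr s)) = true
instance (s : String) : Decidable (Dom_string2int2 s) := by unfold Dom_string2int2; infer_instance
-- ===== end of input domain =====

-- B replaces A's single Horner loop (which raises mid-loop) by a validate-first guard
-- plus a separate positional weighted-sum pass digit*10^p over the reversed body
-- (objective: alternative decomposition; not claimed faster).

-- ===== PORT A =====
def isNumber (c : Char) : Bool := decide ('0' ≤ c) && decide (c ≤ '9')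

-- the for-loop: Horner accumulation, 'none' = ValueError raised
def string2int2_loop (body : List Char) (result : Int) : Option Int :=
  match body with
  | [] => some result
  | x :: rest =>
    if isNumber x then string2int2_loop rest (result * 10 + ((x.toNat : Int) - 48))
    else none

def string2int2_core (l : List Char) : Int :=
  match l with
  | [] => 0  -- Python: IndexError on s[0]; outside Pre_
  | c0 :: rest =>
    let sign : Int := if c0 = '-' then -1 else 1
    let body := if isNumber c0 then c0 :: rest else rest
    match string2int2_loop body 0 with
    | some result => sign * result
    | none => 0  -- Python: ValueError; outside Pre_

def string2int2 (s : String) : Int := string2int2_core s.toList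

-- ===== PORT B =====
-- sum((ord(c)-48) * 10**p for p, c in enumerate(reversed(body)))  (p ≥ 0 always, so .toNat is exact)
def string2int2_possum (body : List Char) : Int :=
  (PySem.List.enumerate body.reverse).foldl
    (fun acc pc => acc + ((pc.2.toNat : Int) - 48) * 10 ^ pc.1.toNat) 0

def string2int2_alt_core (l : List Char) : Int :=
  match l with
  | [] => 0  -- Python: IndexError on s[0]; outside Pre_
  | c0 :: rest =>
    let sign : Int := if c0 = '-' then -1 else 1
    let body := if decide ('0' ≤ c0) && decide (c0 ≤ '9') then c0 :: rest else rest
    if body.any (fun c => !(decide ('0' ≤ c) && decide (c ≤ '9'))) then 0  -- ValueError; outside Pre_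
    else sign * string2int2_possum body

def string2int2_alt (s : String) : Int := string2int2_alt_core s.toList

-- ===== PRECONDITION & SPEC =====
-- Pre_ excludes exactly the inputs where Python A raises: the empty string (IndexError on s[0])
-- and strings with a non-digit after the first character (ValueError in the loop).
def Pre_string2int2 (s : String) : Prop :=
  s.toList.isEmpty = false ∧
    s.toList.tail.all (fun c => decide ('0' ≤ c) && decide (c ≤ '9')) = true
instance (s : String) : Decidable (Pre_string2int2 s) := by unfold Pre_string2int2; infer_instance

def pvWitness_string2int2 : String := "-12"

def Spec_string2int2 (s : String) (out : Int) : Prop := out = string2int2_alt s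
instance (s : String) (out : Int) : Decidable (Spec_string2int2 s out) := by unfold Spec_string2int2; infer_instance

-- ===== CLAIM (what is proved, stated in full; the proofs are below) =====
def Claim_equal_string2int2 : Prop := ∀ (s : String), Dom_string2int2 s → Pre_string2int2 s → Spec_string2int2 s (string2int2 s)

-- ===== LEMMAS AND PROOFS =====

-- Horner value of a digit list (the proof's handle on A's loop)
def hornerVal (l : List Char) : Int :=
  match l with
  | [] => 0
  | x :: rest => hornerVal rest + ((x.toNat : Int) - 48) * 10 ^ rest.length

theorem string2int2_loop_digits (l : List Char) (r : Int)
    (h : ∀ c ∈ l, '0' ≤ c ∧ c ≤ '9') :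
    string2int2_loop l r = some (r * 10 ^ l.length + hornerVal l) := by
  induction l generalizing r with
  | nil => simp [string2int2_loop, hornerVal]
  | cons x rest ih =>
    have hx := h x (by simp)
    simp only [string2int2_loop, isNumber, hx.1, hx.2, decide_true, Bool.and_self, if_true]
    rw [ih _ (fun c hc => h c (List.mem_cons_of_mem _ hc))]
    simp [hornerVal, List.length_cons, pow_succ]
    ring

def enumSum (m : List Char) (s : Int) : Int :=
  ((PySem.List.enumerate m s).map
    (fun pc => ((pc.2.toNat : Int) - 48) * 10 ^ pc.1.toNat)).sum

theorem enumSum_shift (m : List Char) (s : Int) (hs : 0 ≤ s) :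
    enumSum m (s + 1) = 10 * enumSum m s := by
  induction m generalizing s with
  | nil => simp [enumSum, PySem.List.enumerate_nil]
  | cons y ys ih =>
    have h1 : (s + 1).toNat = s.toNat + 1 := by omega
    simp only [enumSum, PySem.List.enumerate_cons, List.map_cons, List.sum_cons] at *
    rw [ih (s + 1) (by omega), ih s hs, h1, pow_succ]
    ring

theorem possum_eq_enumSum (l : List Char) :
    string2int2_possum l = enumSum l.reverse 0 := by
  unfold string2int2_possum enumSum
  rw [PySem.List.foldl_add (a := (0:Int))]
  simp

theorem possum_snoc (l : List Char) (c : Char) :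
    string2int2_possum (l ++ [c]) = 10 * string2int2_possum l + ((c.toNat : Int) - 48) := by
  rw [possum_eq_enumSum, possum_eq_enumSum, List.reverse_append]
  simp only [List.reverse_singleton, List.singleton_append, enumSum,
    PySem.List.enumerate_cons, List.map_cons, List.sum_cons]
  have hsh := enumSum_shift l.reverse 0 le_rfl
  simp only [enumSum] at hsh
  rw [hsh]
  simp only [Int.toNat_zero, pow_zero, mul_one]
  ring

theorem hornerVal_snoc (l : List Char) (c : Char) :
    hornerVal (l ++ [c]) = 10 * hornerVal l + ((c.toNat : Int) - 48) := by
  induction l with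
  | nil => simp [hornerVal]
  | cons x rest ih =>
    simp only [List.cons_append, hornerVal, ih, List.length_append,
      List.length_singleton, pow_succ]
    ring

theorem possum_eq_horner (l : List Char) :
    string2int2_possum l = hornerVal l := by
  induction l using List.reverseRecOn with
  | nil => rfl
  | append_singleton m c ih => rw [possum_snoc, hornerVal_snoc, ih]

theorem core_eq (l : List Char) (h : ∀ c ∈ l.tail, '0' ≤ c ∧ c ≤ '9') (hne : l ≠ []) :
    string2int2_core l = string2int2_alt_core l := by
  match l with
  | [] => exact absurd rfl hne
  | c0 :: rest =>
    simp only [List.tail_cons] at h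
    have hrest : ∀ c ∈ rest, isNumber c = true := by
      intro c hc
      have := h c hc
      simp [isNumber, this.1, this.2]
    simp only [string2int2_core, string2int2_alt_core]
    have hbodyB : (if decide ('0' ≤ c0) && decide (c0 ≤ '9') then c0 :: rest else rest)
        = (if isNumber c0 then c0 :: rest else rest) := by rfl
    rw [hbodyB]
    by_cases hc0 : isNumber c0 = true
    · have hall : ∀ c ∈ c0 :: rest, '0' ≤ c ∧ c ≤ '9' := by
        intro c hc
        rcases List.mem_cons.mp hc with rfl | hm
        · simpa [isNumber] using hc0
        · exact h c hm
      have hany : (c0 :: rest).any (fun c => !(decide ('0' ≤ c) && decide (c ≤ '9'))) = false := by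
        simp only [List.any_eq_false]
        intro c hc
        have := hall c hc
        simp [this.1, this.2]
      rw [if_pos hc0, string2int2_loop_digits _ _ hall, hany]
      simp [possum_eq_horner]
    · have hany : rest.any (fun c => !(decide ('0' ≤ c) && decide (c ≤ '9'))) = false := by
        simp only [List.any_eq_false]
        intro c hc
        have := h c hc
        simp [this.1, this.2]
      rw [if_neg hc0, string2int2_loop_digits _ _ h, hany]
      simp [possum_eq_horner]

-- ===== VERDICT (by name: the statement is the Claim_ definition above) =====
theorem string2int2_spec : Claim_equal_string2int2 := by
  intro s _ hpre
  unfold Pre_string2int2 at hpre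
  have hne : s.toList ≠ [] := by
    simpa using hpre.1
  have h : ∀ c ∈ s.toList.tail, '0' ≤ c ∧ c ≤ '9' := by
    intro c hc
    simpa using List.all_eq_true.mp hpre.2 c hc
  unfold Spec_string2int2 string2int2 string2int2_alt
  exact core_eq s.toList h hne
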